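-- pv_equiv track=rewrite | github.com/AmanHaris/avey-bloom-engine-test-suite | claim_utils.py | combineByKey
-- ===== SOURCE A (Python) =====
-- def combineByKey(dict_list, dict_keys):
--     res = {}
--     for entry in dict_list:
--         key_val = ""
--         count = 0
--         for k in dict_keys:
--             try:
--                 key_val = key_val + " + "*bool(count) + entry[k]
--             except:
--                 raise Exception(f"key {k} not in subclaim")
--             count += 1
--
--         if key_val in res:
--             res[key_val].append(entry)
--         else:
--             res[key_val] = [entry]
--     return res
-- ===== SOURCE B (Python) =====
-- def combineByKey(dict_list, dict_keys):
--     def composite(entry):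
--         parts = []
--         for k in dict_keys:
--             if k not in entry:
--                 raise Exception(f"key {k} not in subclaim")
--             parts.append(entry[k])
--         return " + ".join(parts)
--
--     keys = [composite(e) for e in dict_list]
--     return {kv: [e for kv2, e in zip(keys, dict_list) if kv2 == kv]
--             for kv in dict.fromkeys(keys)}
-- ===== Notes on version B (the rewrite author's own statement) =====
-- stated objective: alternative
-- what changed: Replaces the single-pass hash-bucket loop (incremental key concatenation with a count flag plus append-or-create dict branches) by a three-stage pipeline: compute every composite key once with ' + '.join, dedupe the keys in first-appearance order with dict.fromkeys, then build each group by filtering the (key, entry) zip in a dict comprehension.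
import Mathlib
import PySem

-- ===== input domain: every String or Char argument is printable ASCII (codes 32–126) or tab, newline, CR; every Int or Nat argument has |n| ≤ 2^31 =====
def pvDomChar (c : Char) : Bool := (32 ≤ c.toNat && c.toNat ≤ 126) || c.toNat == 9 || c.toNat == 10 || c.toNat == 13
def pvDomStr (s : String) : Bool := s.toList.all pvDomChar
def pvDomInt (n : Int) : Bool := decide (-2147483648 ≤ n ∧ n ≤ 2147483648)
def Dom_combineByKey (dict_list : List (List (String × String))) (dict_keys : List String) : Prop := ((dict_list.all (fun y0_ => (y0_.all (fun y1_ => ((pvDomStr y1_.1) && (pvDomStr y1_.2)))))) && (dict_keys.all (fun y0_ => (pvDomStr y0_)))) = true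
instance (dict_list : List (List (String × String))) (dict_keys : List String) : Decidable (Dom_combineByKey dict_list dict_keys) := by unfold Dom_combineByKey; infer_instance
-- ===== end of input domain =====

-- B groups by ' + '.join-ed composite keys in three stages (keys, ordered dedup, per-key filter)
-- instead of A's single hash-bucket pass; alternative decomposition, no speed claim. Return value only.

-- ===== PORT A =====
-- inner loop: key_val = key_val + " + "*bool(count) + entry[k]; count += 1.
-- entry[k] is first-match lookup; a missing key raises in Python — excluded by Pre_, getD "" here.
def cbkKeyA (entry : List (String × String)) (dict_keys : List String) : String :=
  (dict_keys.foldl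
    (fun (p : String × Int) k =>
      (p.1 ++ (if p.2 ≠ 0 then " + " else "") ++ (PySem.Dict.mk entry).getD k "", p.2 + 1))
    ("", 0)).1

def combineByKey (dict_list : List (List (String × String))) (dict_keys : List String) :
    List (String × List (List (String × String))) :=
  (dict_list.foldl
    (fun (res : PySem.Dict String (List (List (String × String)))) entry =>
      let key_val := cbkKeyA entry dict_keys
      if res.contains key_val then
        -- res[key_val].append(entry): value grows in place, position kept
        res.modify key_val [] (fun l => l ++ [entry])
      else
        res.insert key_val [entry])
    PySem.Dict.empty).items

-- ===== PORT B =====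
-- composite(entry): collect parts (missing key raises in Python — excluded by Pre_), then " + ".join
def cbkComposite (dict_keys : List String) (entry : List (String × String)) : String :=
  PySem.Str.join " + "
    (dict_keys.foldl (fun acc k => acc ++ [(PySem.Dict.mk entry).getD k ""]) [])

def combineByKey_alt (dict_list : List (List (String × String))) (dict_keys : List String) :
    List (String × List (List (String × String))) :=
  let keys := dict_list.map (cbkComposite dict_keys)
  (PySem.List.dedup keys).map (fun kv =>
    (kv, ((keys.zip dict_list).filter (fun p => p.1 == kv)).map (fun p => p.2)))

-- ===== PRECONDITION & SPEC =====
-- Pre_ excludes exactly the inputs where Python A raises: some entry missing one of dict_keys.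
def Pre_combineByKey (dict_list : List (List (String × String))) (dict_keys : List String) : Prop :=
  ∀ e ∈ dict_list, ∀ k ∈ dict_keys, k ∈ e.map Prod.fst
instance (dict_list : List (List (String × String))) (dict_keys : List String) : Decidable (Pre_combineByKey dict_list dict_keys) := by unfold Pre_combineByKey; infer_instance

def pvWitness_combineByKey : (List (List (String × String))) × List String :=
  ([[("a", "x")], [("a", "y")], [("a", "x"), ("b", "z")]], ["a"])

def Spec_combineByKey (dict_list : List (List (String × String))) (dict_keys : List String) (out : List (String × List (List (String × String)))) : Prop := out = combineByKey_alt dict_list dict_keys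
instance (dict_list : List (List (String × String))) (dict_keys : List String) (out : List (String × List (List (String × String)))) : Decidable (Spec_combineByKey dict_list dict_keys out) := by unfold Spec_combineByKey; infer_instance

-- ===== CLAIM (what is proved, stated in full; the proofs are below) =====
def Claim_equal_combineByKey : Prop := ∀ (dict_list : List (List (String × String))) (dict_keys : List String), Dom_combineByKey dict_list dict_keys → Pre_combineByKey dict_list dict_keys → Spec_combineByKey dict_list dict_keys (combineByKey dict_list dict_keys)

-- ===== LEMMAS AND PROOFS =====

-- A's branch on `key_val in res` is exactly Dict.modify (append to the bucket, or open a new one)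
theorem cbk_step_eq_modify (d : PySem.Dict String (List (List (String × String))))
    (kv : String) (e : List (String × String)) :
    (if d.contains kv then d.modify kv [] (fun l => l ++ [e]) else d.insert kv [e]) =
      d.modify kv [] (fun l => l ++ [e]) := by
  by_cases h : d.contains kv
  · simp [h]
  · simp only [Bool.not_eq_true] at h
    simp [h, PySem.Dict.modify, PySem.Dict.getD_of_not_contains d [] h]

-- A's running concatenation with a nonzero count prepends " + " before every further part
theorem cbkKeyA_fold_pos (g : String → String) (ks : List String) :
    ∀ (s : String) (n : Int), 0 < n →
      ((ks.foldl (fun (p : String × Int) k =>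
          (p.1 ++ (if p.2 ≠ 0 then " + " else "") ++ g k, p.2 + 1)) (s, n)).1).toList =
        s.toList ++ (ks.map (fun k => " + ".toList ++ (g k).toList)).flatten := by
  induction ks with
  | nil => intro s n _; simp
  | cons k ks ih =>
    intro s n hn
    have hne : n ≠ 0 := by omega
    simp only [List.foldl_cons, if_pos hne]
    rw [ih (s ++ " + " ++ g k) (n + 1) (by omega)]
    simp

-- " + ".join(parts) is head ++ (" + " ++ part) for the rest
theorem cbk_join_eq (g : String → String) (ks : List String) :
    (PySem.Chars.join " + ".toList ((ks.map g).map String.toList)) =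
      match ks with
      | [] => []
      | k :: rest => (g k).toList ++ (rest.map (fun k => " + ".toList ++ (g k).toList)).flatten := by
  induction ks with
  | nil => simp [PySem.Chars.join_nil]
  | cons k rest ih =>
    cases rest with
    | nil => simp [PySem.Chars.join_singleton]
    | cons k' rest' =>
      simp only [List.map_cons] at ih ⊢
      rw [PySem.Chars.join_cons_cons]
      simp only [ih, List.flatten_cons]
      simp

-- the two composite-key computations agree
theorem cbkKey_eq (dict_keys : List String) (entry : List (String × String)) :
    cbkKeyA entry dict_keys = cbkComposite dict_keys entry := by
  apply String.toList_inj.mp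
  unfold cbkKeyA cbkComposite
  rw [PySem.List.foldl_append_singleton_eq_map]
  simp only [List.nil_append, PySem.Str.join, String.toList_ofList, List.map_map]
  rw [show List.map (String.toList ∘ fun k => (PySem.Dict.mk entry).getD k "") dict_keys =
        (dict_keys.map (fun k => (PySem.Dict.mk entry).getD k "")).map String.toList by
      simp [List.map_map]]
  rw [cbk_join_eq (fun k => (PySem.Dict.mk entry).getD k "") dict_keys]
  cases dict_keys with
  | nil => simp
  | cons k ks =>
    simp only [List.foldl_cons]
    rw [cbkKeyA_fold_pos (fun k => (PySem.Dict.mk entry).getD k "") ks _ (0+1) (by omega)]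
    simp

-- zipping a list with its own mapped keys is a single map
theorem cbk_zip_map {α β : Type} (f : α → β) (l : List α) :
    (l.map f).zip l = l.map (fun e => (f e, e)) := by
  induction l with
  | nil => rfl
  | cons x xs ih => simpa using ih

theorem combineByKey_spec_aux (dict_list : List (List (String × String))) (dict_keys : List String) :
    combineByKey dict_list dict_keys = combineByKey_alt dict_list dict_keys := by
  unfold combineByKey combineByKey_alt
  have hstep : (fun (res : PySem.Dict String (List (List (String × String)))) entry =>
      let key_val := cbkKeyA entry dict_keys
      if res.contains key_val then res.modify key_val [] (fun l => l ++ [entry])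
      else res.insert key_val [entry]) =
      fun res entry => res.modify (cbkComposite dict_keys entry) [] (fun l => l ++ [entry]) := by
    funext res e
    show (if res.contains (cbkKeyA e dict_keys) then _ else _) = _
    rw [cbk_step_eq_modify, cbkKey_eq]
  rw [hstep]
  set f := cbkComposite dict_keys with hf
  set D := dict_list.foldl
    (fun (res : PySem.Dict String (List (List (String × String)))) e =>
      res.modify (f e) [] (fun l => l ++ [e])) PySem.Dict.empty with hD
  have hnod : D.keys.Nodup :=
    PySem.Dict.nodup_keys_foldl_modify_key dict_list f [] (fun _ e l => l ++ [e])
      PySem.Dict.empty PySem.Dict.nodup_keys_empty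
  have hkeys : D.keys = PySem.Set.ofList (dict_list.map f) := by
    rw [hD, PySem.Dict.keys_foldl_modify_key dict_list f [] (fun _ e l => l ++ [e])
      PySem.Dict.empty, PySem.Dict.keys_empty, PySem.Set.ofList_eq_foldl]
    rfl
  have hgetD : ∀ c, D.getD c [] =
      ((dict_list.map (fun e => (f e, e))).filter (fun p => p.1 == c)).map (fun p => p.2) := by
    intro c
    have : D = (dict_list.map (fun e => (f e, e))).foldl
        (fun d p => d.modify p.1 [] (fun x => x ++ [p.2])) PySem.Dict.empty := by
      rw [List.foldl_map]
    rw [this, PySem.Dict.getD_foldl_modify_append, PySem.Dict.getD_empty, List.nil_append]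
  have hzip := cbk_zip_map f dict_list
  rw [PySem.Dict.items_eq_map_keys D hnod [], hkeys]
  show _ = (PySem.List.dedup (dict_list.map f)).map _
  rw [PySem.List.dedup_eq_ofList, hzip]
  apply List.map_congr_left
  intro k _
  rw [hgetD k]

-- ===== VERDICT (by name: the statement is the Claim_ definition above) =====
theorem combineByKey_spec : Claim_equal_combineByKey := by
  intro dict_list dict_keys _ _
  unfold Spec_combineByKey
  exact combineByKey_spec_aux dict_list dict_keys
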